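-- pv_equiv track=rewrite | github.com/ksee1230/Algorithm | programmers/summarizeString.py | solution
-- ===== SOURCE A (Python) =====
-- def solution(s):
--     n = len(s)
--     answer = n
--     for i in range(1, n//2+1):
--         tmpStr = s[0:i]
--         count = 1
--         res = ""
--         a, b = divmod(n, i)
--
--         for j in range(1, a):
--             curStr = s[i*j:i*(j+1)]
--             if curStr == tmpStr:
--                 count += 1
--             else:
--                 if count == 1:
--                     res += tmpStr
--                 else:
--                     res += (str(count) + tmpStr)
--                     count = 1
--                 tmpStr = curStr
--         else:
--             if count == 1:
--                 res += tmpStr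
--             else:
--                 res += (str(count) + tmpStr)
--
--         if b != 0:
--             b *= -1
--             res += s[b:]
--
--         answer = min(answer, len(res))
--     return answer
-- ===== SOURCE B (Python) =====
-- def solution(s):
--     n = len(s)
--     best = n
--     for i in range(1, n // 2 + 1):
--         # prefix sums of shifted-mismatch indicators: pref[k] = #{p < k : s[p] != s[p+i]}
--         pref = [0]
--         acc = 0
--         for p in range(n - i):
--             acc += s[p] != s[p + i]
--             pref.append(acc)
--         m = n // i
--         # blocks j-1 and j (size i) are equal iff no mismatch position lies in [i*(j-1), i*j)
--         bounds = [0] + [j for j in range(1, m) if pref[i * j] > pref[i * (j - 1)]] + [m]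
--         total = n - i * m
--         for lo, hi in zip(bounds, bounds[1:]):
--             c = hi - lo
--             total += i + (len(str(c)) if c > 1 else 0)
--         best = min(best, total)
--     return best
-- ===== Notes on version B (the rewrite author's own statement) =====
-- stated objective: alternative
-- what changed: B never builds the compressed string or compares block slices: per block size it precomputes a prefix-sum table of shifted character mismatches (adjacent blocks then compare in O(1)), reads off the list of run boundaries, and sums block size plus count-digit lengths over boundary gaps, whereas A runs a run-length state machine concatenating counts and blocks into a string and measures it.
import Mathlib
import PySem

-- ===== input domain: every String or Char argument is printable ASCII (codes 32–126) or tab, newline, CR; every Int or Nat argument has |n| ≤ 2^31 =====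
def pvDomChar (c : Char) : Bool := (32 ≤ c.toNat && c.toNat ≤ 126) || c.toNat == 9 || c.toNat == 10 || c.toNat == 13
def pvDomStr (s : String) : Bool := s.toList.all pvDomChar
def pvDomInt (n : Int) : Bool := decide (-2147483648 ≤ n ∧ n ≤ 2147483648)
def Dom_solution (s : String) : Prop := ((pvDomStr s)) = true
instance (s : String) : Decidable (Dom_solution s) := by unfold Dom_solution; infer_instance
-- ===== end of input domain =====

-- B replaces A's run-length state machine that concatenates the compressed string and measures
-- it by a staged computation per block size: a prefix-sum table of shifted character mismatches
-- (so two adjacent blocks compare in O(1)), a list of run boundaries read off that table, and an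
-- arithmetic sum over boundary gaps; objective: alternative (no string is ever built).

-- ===== PORT A =====
-- A-side helper: the body of A's inner loop acting on the state (tmpStr, count, res)
def pvStepA (st : List Char × Int × List Char) (curStr : List Char) :
    List Char × Int × List Char :=
  if curStr == st.1 then (st.1, st.2.1 + 1, st.2.2)
  else if st.2.1 == 1 then (curStr, (1 : Int), st.2.2 ++ st.1)
  else (curStr, (1 : Int), st.2.2 ++ PySem.Int.toChars st.2.1 ++ st.1)

-- A-side helper: the for-else flush that appends the last pending block to res
def pvFlushA (st : List Char × Int × List Char) : List Char :=
  if st.2.1 == 1 then st.2.2 ++ st.1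
  else st.2.2 ++ PySem.Int.toChars st.2.1 ++ st.1

def solution (s : String) : Int :=
  let cs := s.toList
  let n : Int := PySem.List.len cs
  (PySem.List.pyRange 1 (PySem.Int.floordiv n 2 + 1) 1).foldl
    (fun answer i =>
      let a := PySem.Int.floordiv n i    -- divmod(n, i), i ≥ 1 here so it never raises
      let b := PySem.Int.mod n i
      let st := (PySem.List.pyRange 1 a 1).foldl
        (fun st j => pvStepA st (PySem.List.slice cs (some (i * j)) (some (i * (j + 1)))))
        (PySem.List.slice cs (some 0) (some i), (1 : Int), ([] : List Char))
      let res := pvFlushA st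
      let res := if b ≠ 0 then res ++ PySem.List.slice cs (some (-b)) none else res
      min answer (PySem.List.len res))
    n

-- ===== PORT B =====
-- B-side helper: length contribution of the count written before a run of c blocks
def pvDigits (c : Int) : Int :=
  if c > 1 then PySem.List.len (PySem.Int.toChars c) else 0

def solution_alt (s : String) : Int :=
  let cs := s.toList
  let n : Int := PySem.List.len cs
  (PySem.List.pyRange 1 (PySem.Int.floordiv n 2 + 1) 1).foldl
    (fun best i =>
      -- pref[k] = number of p < k with s[p] != s[p+i]; all indices are in range,
      -- so pyGetD is exact for Python's s[p], s[p+i], pref[...] here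
      let pref := ((PySem.List.pyRange 0 (n - i) 1).foldl
        (fun (st : Int × List Int) p =>
          let acc := st.1 +
            (if PySem.List.pyGetD cs p ' ' ≠ PySem.List.pyGetD cs (p + i) ' ' then 1 else 0)
          (acc, st.2 ++ [acc]))
        ((0 : Int), [(0 : Int)])).2
      let m := PySem.Int.floordiv n i
      let bounds := (0 : Int) ::
        ((PySem.List.pyRange 1 m 1).filter
          (fun j => decide (PySem.List.pyGetD pref (i * (j - 1)) 0 <
                            PySem.List.pyGetD pref (i * j) 0))) ++ [m]
      let total := (bounds.zip (bounds.drop 1)).foldl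
        (fun t pr => t + i + pvDigits (pr.2 - pr.1)) (n - i * m)
      min best total)
    n

-- ===== PRECONDITION & SPEC =====
def Spec_solution (s : String) (out : Int) : Prop := out = solution_alt s
instance (s : String) (out : Int) : Decidable (Spec_solution s out) := by unfold Spec_solution; infer_instance

-- ===== CLAIM (what is proved, stated in full; the proofs are below) =====
def Claim_equal_solution : Prop := ∀ (s : String), Dom_solution s → Spec_solution s (solution s)

-- ===== LEMMAS AND PROOFS =====

-- block number j of size iN, in take/drop normal form
def pvBlk (cs : List Char) (iN j : Nat) : List Char := (cs.drop (iN * j)).take iN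

-- number of positions p < k with cs[p] != cs[p+iN]
def pvMis (cs : List Char) (iN k : Nat) : Nat :=
  (List.range k).countP (fun p => decide (cs.getD p ' ' ≠ cs.getD (p + iN) ' '))

-- run boundaries among the first J+1 blocks: j ≥ 1 with block j-1 ≠ block j
def pvBrks (cs : List Char) (iN J : Nat) : List Nat :=
  ((List.range J).filter (fun k => decide (pvBlk cs iN k ≠ pvBlk cs iN (k + 1)))).map (· + 1)

def pvBds (cs : List Char) (iN J : Nat) : List Nat := 0 :: pvBrks cs iN J

def pvLast (cs : List Char) (iN J : Nat) : Nat := (pvBds cs iN J).getLastD 0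

def pvCast (l : List Nat) : List Int := l.map Int.ofNat

-- B's pair sum over a boundary list
def pvPS (iN : Nat) (l : List Int) : Int :=
  ((l.zip (l.drop 1)).map (fun pr => (iN : Int) + pvDigits (pr.2 - pr.1))).sum

-- A's machine state after comparing blocks 1..J against the running run
def pvStA (cs : List Char) (iN J : Nat) : List Char × Int × List Char :=
  (List.range J).foldl (fun st k => pvStepA st (pvBlk cs iN (k + 1)))
    (pvBlk cs iN 0, (1 : Int), ([] : List Char))

theorem pvPS_cons_cons (iN : Nat) (a b : Int) (t : List Int) :
    pvPS iN (a :: b :: t) = ((iN : Int) + pvDigits (b - a)) + pvPS iN (b :: t) := by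
  simp [pvPS]

theorem pvPS_append (iN : Nat) (l : List Int) (hl : l ≠ []) (x : Int) :
    pvPS iN (l ++ [x]) = pvPS iN l + ((iN : Int) + pvDigits (x - l.getLastD 0)) := by
  induction l with
  | nil => simp at hl
  | cons a t ih =>
    cases t with
    | nil => simp [pvPS]
    | cons b t' =>
      have h := ih (by simp)
      rw [List.cons_append, pvPS_cons_cons, List.cons_append] at *
      rw [pvPS_cons_cons]
      rw [h]
      ring_nf
      simp

theorem pvLast_le (cs : List Char) (iN J : Nat) : pvLast cs iN J ≤ J := by
  rw [pvLast, List.getLastD_eq_getLast?]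
  rcases hq : (pvBds cs iN J).getLast? with _ | q
  · simp
  · have h := List.mem_of_getLast? hq
    simp only [Option.getD_some]
    rcases List.mem_cons.mp h with h0 | hm
    · omega
    · simp only [pvBrks, List.mem_map, List.mem_filter, List.mem_range] at hm
      obtain ⟨k, ⟨hk, _⟩, he⟩ := hm
      omega

theorem pvBrks_succ (cs : List Char) (iN J : Nat) :
    pvBrks cs iN (J + 1) = pvBrks cs iN J ++
      (if pvBlk cs iN J ≠ pvBlk cs iN (J + 1) then [J + 1] else []) := by
  rw [pvBrks, List.range_succ, List.filter_append, List.map_append]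
  rw [pvBrks]
  congr 1
  by_cases h : pvBlk cs iN J ≠ pvBlk cs iN (J + 1) <;> simp [h]

theorem pvBlk_len (cs : List Char) (iN j : Nat) (h : iN * (j + 1) ≤ cs.length) :
    (pvBlk cs iN j).length = iN := by
  have hmul : iN * (j + 1) = iN * j + iN := by ring
  simp [pvBlk]
  omega

theorem pvBlk_eq_iff (cs : List Char) (iN j : Nat) (h : iN * (j + 2) ≤ cs.length) :
    pvBlk cs iN j = pvBlk cs iN (j + 1) ↔
      ∀ t < iN, cs.getD (iN * j + t) ' ' = cs.getD (iN * j + t + iN) ' ' := by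
  have hmul : iN * (j + 2) = iN * j + iN + iN := by ring
  have hmul1 : iN * (j + 1) = iN * j + iN := by ring
  constructor
  · intro he t ht
    have h1 : iN * j + t < cs.length := by omega
    have h2 : iN * (j+1) + t < cs.length := by omega
    have := congrArg (fun l => l.getD t ' ') he
    simp only [pvBlk, List.getD_eq_getElem?_getD, List.getElem?_take, List.getElem?_drop] at this ⊢
    simp [ht] at this
    rw [List.getElem?_eq_getElem h1, List.getElem?_eq_getElem h2] at this
    rw [List.getElem?_eq_getElem h1, List.getElem?_eq_getElem (by omega : iN * j + t + iN < cs.length)]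
    simpa [show iN * (j+1) + t = iN * j + t + iN by ring] using this
  · intro hp
    apply List.ext_getElem
    · rw [pvBlk_len cs iN j (by omega), pvBlk_len cs iN (j+1) (by omega)]
    · intro t h1 h2
      rw [pvBlk_len cs iN j (by omega)] at h1
      have ha : iN * j + t < cs.length := by omega
      have hb : iN * j + t + iN < cs.length := by omega
      have := hp t h1
      rw [List.getD_eq_getElem _ _ ha, List.getD_eq_getElem _ _ hb] at this
      simp only [pvBlk, List.getElem_take, List.getElem_drop]
      simpa [show iN * (j+1) + t = iN * j + t + iN by ring] using this

theorem pvMis_window (cs : List Char) (iN a : Nat) :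
    pvMis cs iN (a + iN) = pvMis cs iN a +
      (List.range iN).countP (fun t => decide (cs.getD (a + t) ' ' ≠ cs.getD (a + t + iN) ' ')) := by
  rw [pvMis, List.range_add, List.countP_append, pvMis, List.countP_map]
  congr 1

theorem pv_cond (cs : List Char) (iN j : Nat) (h : iN * (j + 2) ≤ cs.length) :
    (pvMis cs iN (iN * j) < pvMis cs iN (iN * (j + 1))) ↔
      pvBlk cs iN j ≠ pvBlk cs iN (j + 1) := by
  have hw := pvMis_window cs iN (iN * j)
  rw [show iN * j + iN = iN * (j + 1) by ring] at hw
  rw [hw, Nat.lt_add_right_iff_pos]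
  rw [ne_eq, pvBlk_eq_iff cs iN j h]
  constructor
  · intro hp hall
    rcases List.countP_pos_iff.mp hp with ⟨t, ht, hd⟩
    rw [List.mem_range] at ht
    simp at hd
    exact hd (hall t ht)
  · intro hne
    by_contra hz
    push Not at hz
    rw [Nat.le_zero] at hz
    rw [List.countP_eq_zero] at hz
    apply hne
    intro t ht
    have := hz t (List.mem_range.mpr ht)
    simpa using this

theorem pv_pref (cs : List Char) (iN : Nat) (K : Nat) :
    (PySem.List.pyRange 0 (K : Int)).foldl
      (fun (st : Int × List Int) p =>
        (st.1 + (if PySem.List.pyGetD cs p ' ' ≠ PySem.List.pyGetD cs (p + (iN : Int)) ' ' then 1 else 0),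
         st.2 ++ [st.1 + (if PySem.List.pyGetD cs p ' ' ≠ PySem.List.pyGetD cs (p + (iN : Int)) ' ' then 1 else 0)]))
      ((0 : Int), [(0 : Int)])
    = ((pvMis cs iN K : Int), (List.range (K + 1)).map (fun k => (pvMis cs iN k : Int))) := by
  rw [PySem.List.pyRange_zero_nat, List.foldl_map]
  induction K with
  | zero => simp [pvMis]
  | succ K ih =>
    rw [List.range_succ, List.foldl_append, ih]
    have hmis : pvMis cs iN (K + 1) = pvMis cs iN K +
        (if cs.getD K ' ' ≠ cs.getD (K + iN) ' ' then 1 else 0) := by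
      rw [pvMis, List.range_succ, List.countP_append, pvMis]
      by_cases hc : cs.getD K ' ' ≠ cs.getD (K + iN) ' ' <;> simp
    simp only [List.foldl_cons, List.foldl_nil]
    rw [show ((K : Int) + (iN : Int)) = ((K + iN : Nat) : Int) by push_cast; ring]
    simp only [PySem.List.pyGetD_natCast]
    rw [Prod.mk.injEq]
    constructor
    · rw [hmis]; split_ifs <;> push_cast <;> ring
    · rw [List.range_succ (n := K + 1), List.map_append]
      congr 1
      simp only [List.map_cons, List.map_nil]
      rw [hmis]; split_ifs <;> push_cast <;> ring_nf

theorem pv_inv (cs : List Char) (iN : Nat) (h1 : 1 ≤ iN) : ∀ J, iN * (J + 1) ≤ cs.length →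
    (pvStA cs iN J).1 = pvBlk cs iN J ∧
    (pvStA cs iN J).2.1 = (J : Int) + 1 - (pvLast cs iN J : Int) ∧
    ((pvStA cs iN J).2.2.length : Int) = pvPS iN (pvCast (pvBds cs iN J)) := by
  intro J
  induction J with
  | zero =>
    intro _
    refine ⟨rfl, ?_, ?_⟩ <;> simp [pvStA, pvLast, pvBds, pvBrks, pvPS, pvCast]
  | succ J ih =>
    intro hlen
    have hlen' : iN * (J + 1) ≤ cs.length := by
      have h2 : iN * (J + 1 + 1) = iN * (J + 1) + iN := by ring
      omega
    have hstep : pvStA cs iN (J + 1) = pvStepA (pvStA cs iN J) (pvBlk cs iN (J + 1)) := by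
      rw [pvStA, List.range_succ, List.foldl_append]; rfl
    have hlast_le := pvLast_le cs iN J
    obtain ⟨htmp, hcnt, hres⟩ := ih hlen'
    rcases hstA : pvStA cs iN J with ⟨tmp, cnt, res⟩
    rw [hstA] at htmp hcnt hres hstep
    simp only at htmp hcnt hres
    rw [hstep]
    have hcnt_ge : (1 : Int) ≤ cnt := by rw [hcnt]; omega
    by_cases heq : pvBlk cs iN (J + 1) = pvBlk cs iN J
    · have hbrks : pvBrks cs iN (J + 1) = pvBrks cs iN J := by
        rw [pvBrks_succ, if_neg (by simp [heq.symm])]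
        simp
      have hlast : pvLast cs iN (J + 1) = pvLast cs iN J := by
        simp only [pvLast, pvBds, hbrks]
      have hbeq : (pvBlk cs iN (J + 1) == tmp) = true := by simp [htmp, heq]
      rw [pvStepA, hbeq]
      refine ⟨by simp [htmp, heq], ?_, ?_⟩
      · simp only [hcnt, hlast]; push_cast; ring
      · simpa [pvBds, hbrks] using hres
    · have hbrks : pvBrks cs iN (J + 1) = pvBrks cs iN J ++ [J + 1] := by
        rw [pvBrks_succ,
          if_pos (show pvBlk cs iN J ≠ pvBlk cs iN (J + 1) from fun h => heq h.symm)]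
      have hlast : pvLast cs iN (J + 1) = J + 1 := by
        rw [pvLast, pvBds, hbrks, ← List.cons_append, List.getLastD_eq_getLast?,
          List.getLast?_concat]
        rfl
      have hbeq : (pvBlk cs iN (J + 1) == tmp) = false := by
        simp [htmp]; exact heq
      have htmplen : tmp.length = iN := by rw [htmp]; exact pvBlk_len cs iN J hlen'
      have hps : pvPS iN (pvCast (pvBds cs iN (J + 1)))
          = pvPS iN (pvCast (pvBds cs iN J))
            + ((iN : Int) + pvDigits ((J : Int) + 1 - (pvLast cs iN J : Int))) := by
        have hmap : (pvCast (pvBds cs iN (J + 1)))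
            = (pvCast (pvBds cs iN J)) ++ [((J + 1 : Nat) : Int)] := by
          simp [pvCast, pvBds, hbrks]
        rw [hmap, pvPS_append iN _ (by simp [pvCast, pvBds]) _]
        rcases hq : (pvBds cs iN J).getLast? with _ | q
        · rw [List.getLast?_eq_none_iff] at hq; simp [pvBds] at hq
        · congr 2
          simp only [pvCast]
          rw [List.getLastD_eq_getLast?, List.getLast?_map, hq, pvLast,
            List.getLastD_eq_getLast?, hq]
          simp only [Option.map_some, Option.getD_some]
          congr 1
      have hdig : pvDigits ((J : Int) + 1 - (pvLast cs iN J : Int))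
          = (if cnt == 1 then 0 else ((PySem.Int.toChars cnt).length : Int)) := by
        by_cases hone : cnt = 1
        · rw [pvDigits, if_neg (by rw [← hcnt]; omega), if_pos (by simp [hone])]
        · have hgt : (1 : Int) < cnt := by omega
          rw [pvDigits, if_pos (by rw [← hcnt]; exact hgt), ← hcnt,
            if_neg (by simpa using hone), PySem.List.len_eq]
      have hstep2 : pvStepA (tmp, cnt, res) (pvBlk cs iN (J + 1))
          = (pvBlk cs iN (J + 1), (1 : Int),
             res ++ (if cnt == 1 then ([] : List Char) else PySem.Int.toChars cnt) ++ tmp) := by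
        rw [pvStepA, hbeq]
        by_cases hone : cnt = 1 <;> simp [hone]
      rw [hstep2]
      refine ⟨rfl, ?_, ?_⟩
      · rw [hlast]; push_cast; ring
      · simp only [List.length_append]
        rw [hps, hdig]
        have ht : (tmp.length : Int) = (iN : Int) := by exact_mod_cast htmplen
        by_cases hone : cnt = 1
        · simp only [hone, beq_self_eq_true]
          push_cast
          rw [hres]
          simp
          omega
        · have hbne : (cnt == 1) = false := by simpa using hone
          simp only [hbne, Bool.false_eq_true, if_false]
          push_cast
          rw [hres]
          omega

theorem pv_getLastD_cast (cs : List Char) (iN J : Nat) :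
    (pvCast (pvBds cs iN J)).getLastD 0 = (pvLast cs iN J : Int) := by
  rcases hq : (pvBds cs iN J).getLast? with _ | q
  · rw [List.getLast?_eq_none_iff] at hq; simp [pvBds] at hq
  · simp only [pvCast]
    rw [List.getLastD_eq_getLast?, List.getLast?_map, hq, pvLast,
      List.getLastD_eq_getLast?, hq]
    simp


theorem pv_flush (cs : List Char) (iN J : Nat) (h1 : 1 ≤ iN) (h : iN * (J + 1) ≤ cs.length) :
    ((pvFlushA (pvStA cs iN J)).length : Int) =
      pvPS iN (pvCast (pvBds cs iN J ++ [J + 1])) := by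
  obtain ⟨htmp, hcnt, hres⟩ := pv_inv cs iN h1 J h
  have hlast_le := pvLast_le cs iN J
  rcases hstA : pvStA cs iN J with ⟨tmp, cnt, res⟩
  rw [hstA] at htmp hcnt hres
  simp only at htmp hcnt hres
  have htmplen : tmp.length = iN := by rw [htmp]; exact pvBlk_len cs iN J h
  have hmap : pvCast (pvBds cs iN J ++ [J + 1])
      = pvCast (pvBds cs iN J) ++ [((J + 1 : Nat) : Int)] := by simp [pvCast]
  rw [hmap, pvPS_append iN _ (by simp [pvCast, pvBds]) _, pv_getLastD_cast]
  have harg : ((J + 1 : Nat) : Int) - (pvLast cs iN J : Int) = cnt := by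
    rw [hcnt]; push_cast; ring
  rw [harg]
  by_cases hone : cnt = 1
  · have : (cnt == 1) = true := by simp [hone]
    rw [pvFlushA, this]
    simp only [if_true, List.length_append]
    have hd : pvDigits cnt = 0 := by rw [hone]; rfl
    rw [hd]
    push_cast
    omega
  · have hbne : (cnt == 1) = false := by simpa using hone
    rw [pvFlushA, hbne]
    simp only [Bool.false_eq_true, if_false, List.length_append]
    have hgt : (1 : Int) < cnt := by
      have : (1 : Int) ≤ cnt := by rw [hcnt]; omega
      omega
    have hd : pvDigits cnt = ((PySem.Int.toChars cnt).length : Int) := by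
      rw [pvDigits, if_pos hgt, PySem.List.len_eq]
    rw [hd]
    push_cast
    omega


theorem pv_peri (cs : List Char) (iN : Nat) (h1 : 1 ≤ iN) (h2 : 2 * iN ≤ cs.length) :
    (let n : Int := PySem.List.len cs
     let i : Int := (iN : Int)
     let a := PySem.Int.floordiv n i
     let b := PySem.Int.mod n i
     let st := (PySem.List.pyRange 1 a 1).foldl
       (fun st j => pvStepA st (PySem.List.slice cs (some (i * j)) (some (i * (j + 1)))))
       (PySem.List.slice cs (some 0) (some i), (1 : Int), ([] : List Char))
     let res := pvFlushA st
     let res := if b ≠ 0 then res ++ PySem.List.slice cs (some (-b)) none else res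
     PySem.List.len res)
    = (let n : Int := PySem.List.len cs
       let i : Int := (iN : Int)
       let pref := ((PySem.List.pyRange 0 (n - i) 1).foldl
         (fun (st : Int × List Int) p =>
           let acc := st.1 +
             (if PySem.List.pyGetD cs p ' ' ≠ PySem.List.pyGetD cs (p + i) ' ' then 1 else 0)
           (acc, st.2 ++ [acc]))
         ((0 : Int), [(0 : Int)])).2
       let m := PySem.Int.floordiv n i
       let bounds := (0 : Int) ::
         ((PySem.List.pyRange 1 m 1).filter
           (fun j => decide (PySem.List.pyGetD pref (i * (j - 1)) 0 <
                             PySem.List.pyGetD pref (i * j) 0))) ++ [m]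
       (bounds.zip (bounds.drop 1)).foldl
         (fun t pr => t + i + pvDigits (pr.2 - pr.1)) (n - i * m)) := by
  simp only [PySem.List.len_eq]
  set nN := cs.length with hnN
  have hi : 0 < iN := h1
  have hmge : 2 ≤ nN / iN := Nat.le_div_iff_mul_le hi |>.mpr (by omega)
  set mN := nN / iN with hmN
  set rN := nN % iN with hrN
  have hdm : iN * mN + rN = nN := by
    rw [hmN, hrN]; exact Nat.div_add_mod nN iN
  have hmul : iN * mN ≤ nN := by omega
  have hr_lt : rN < iN := Nat.mod_lt _ hi
  -- arithmetic bridges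
  have hfd : PySem.Int.floordiv (nN : Int) (iN : Int) = (mN : Int) :=
    PySem.Int.floordiv_natCast nN iN
  have hmd : PySem.Int.mod (nN : Int) (iN : Int) = (rN : Int) :=
    PySem.Int.mod_natCast nN iN
  have hsub : (nN : Int) - (iN : Int) = ((nN - iN : Nat) : Int) := by omega
  have htoNat : ((mN : Int) - 1).toNat = mN - 1 := by omega
  -- A's inner fold is pvStA at mN - 1
  have hfoldA : (PySem.List.pyRange 1 (mN : Int) 1).foldl
      (fun st j => pvStepA st (PySem.List.slice cs (some ((iN : Int) * j)) (some ((iN : Int) * (j + 1)))))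
      (PySem.List.slice cs (some 0) (some (iN : Int)), (1 : Int), ([] : List Char))
      = pvStA cs iN (mN - 1) := by
    rw [PySem.List.pyRange_one, htoNat, List.foldl_map, pvStA]
    have hinit : PySem.List.slice cs (some 0) (some (iN : Int)) = pvBlk cs iN 0 := by
      rw [PySem.List.slice_zero_start, PySem.List.slice_to_natCast, pvBlk]
      simp
    rw [hinit]
    apply PySem.List.foldl_congr_mem
    intro acc k _
    congr 1
    rw [show (iN : Int) * (1 + (k : Int)) = ((iN * (k + 1) : Nat) : Int) by push_cast; ring,
      show (iN : Int) * ((1 + (k : Int)) + 1) = ((iN * (k + 1) : Nat) : Int) + ((iN : Nat) : Int) by push_cast; ring,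
      PySem.List.slice_natCast_add, pvBlk]
  -- B's pref table
  have hpref' : ((PySem.List.pyRange 0 (((nN - iN : Nat) : Int)) 1).foldl
      (fun (st : Int × List Int) p =>
        (st.1 + (if PySem.List.pyGetD cs p ' ' ≠ PySem.List.pyGetD cs (p + (iN : Int)) ' ' then 1 else 0),
         st.2 ++ [st.1 + (if PySem.List.pyGetD cs p ' ' ≠ PySem.List.pyGetD cs (p + (iN : Int)) ' ' then 1 else 0)]))
      ((0 : Int), [(0 : Int)])).2
      = (List.range (nN - iN + 1)).map (fun k => (pvMis cs iN k : Int)) := by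
    rw [pv_pref]
  -- B's filter equals the cast break list
  have hfilter : ((PySem.List.pyRange 1 (mN : Int) 1).filter
      (fun j => decide (PySem.List.pyGetD ((List.range (nN - iN + 1)).map (fun k => (pvMis cs iN k : Int))) ((iN : Int) * (j - 1)) 0 <
                        PySem.List.pyGetD ((List.range (nN - iN + 1)).map (fun k => (pvMis cs iN k : Int))) ((iN : Int) * j) 0)))
      = pvCast (pvBrks cs iN (mN - 1)) := by
    rw [PySem.List.pyRange_one, htoNat, List.filter_map]
    rw [pvCast, pvBrks, List.map_map]
    rw [List.filter_congr (q := fun k => decide (pvBlk cs iN k ≠ pvBlk cs iN (k + 1))) ?_]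
    · apply List.map_congr_left
      intro k _
      simp only [Function.comp_apply, Int.ofNat_eq_natCast]
      push_cast
      ring
    · intro k hk
      rw [List.mem_range] at hk
      simp only [Function.comp_apply]
      have e1 : (iN : Int) * ((1 + (k : Int)) - 1) = ((iN * k : Nat) : Int) := by push_cast; ring
      have e2 : (iN : Int) * (1 + (k : Int)) = ((iN * (k + 1) : Nat) : Int) := by push_cast; ring
      have hk2 : iN * (k + 2) ≤ nN := le_trans (Nat.mul_le_mul_left iN (by omega)) hmul
      have hexp : iN * (k + 2) = iN * k + iN + iN := by ring
      have hexp1 : iN * (k + 1) = iN * k + iN := by ring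
      have hb1 : iN * k < nN - iN + 1 := by omega
      have hb2 : iN * (k + 1) < nN - iN + 1 := by omega
      rw [e1, e2, PySem.List.pyGetD_natCast, PySem.List.pyGetD_natCast,
        PySem.List.getD_map_range _ _ _ _ hb1, PySem.List.getD_map_range _ _ _ _ hb2]
      have hcond := pv_cond cs iN k hk2
      simp only [decide_eq_decide, Nat.cast_lt]
      exact hcond
  have hm1 : mN - 1 + 1 = mN := by omega
  have hlenm : iN * (mN - 1 + 1) ≤ cs.length := by rw [hm1]; exact hmul
  have hnn : (nN : Int) - (iN : Int) * (mN : Int) = (rN : Int) := by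
    have h := hdm
    have : ((iN * mN + rN : Nat) : Int) = (nN : Int) := by exact_mod_cast congrArg Nat.cast h
    push_cast at this
    linarith
  have hfold_sum : ∀ (bs : List Int) (init : Int),
      (bs.zip (bs.drop 1)).foldl (fun t pr => t + (iN : Int) + pvDigits (pr.2 - pr.1)) init
        = init + pvPS iN bs := by
    intro bs init
    rw [pvPS, ← PySem.List.foldl_add]
    apply PySem.List.foldl_congr_mem
    intro acc x _
    ring
  have hbounds : (((0 : Int) :: pvCast (pvBrks cs iN (mN - 1))) ++ [(mN : Int)])
      = pvCast (pvBds cs iN (mN - 1) ++ [mN - 1 + 1]) := by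
    rw [hm1]
    simp [pvCast, pvBds]
  simp only [← hnN, hsub, hfd, hmd, hfoldA, hpref', hfilter, hbounds, hfold_sum]
  by_cases hr : rN = 0
  · rw [if_neg (by simp [hr]), pv_flush cs iN (mN - 1) h1 hlenm, hnn]
    simp [hr]
  · rw [if_pos (by simpa using hr)]
    rw [show (-(rN : Int)) = -((rN : Nat) : Int) from rfl,
      PySem.List.slice_from_neg_natCast cs rN (by omega)]
    rw [List.length_append]
    push_cast
    rw [pv_flush cs iN (mN - 1) h1 hlenm, hnn]
    rw [← hnN]
    have hdrop : (List.drop (nN - rN) cs).length = rN := by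
      rw [List.length_drop, ← hnN]; omega
    have he : ((iN * (mN - 1 + 1) : Nat) : Int) = ((iN * mN : Nat) : Int) := by rw [hm1]
    rw [hdrop]
    push_cast at he ⊢
    omega

-- ===== VERDICT (by name: the statement is the Claim_ definition above) =====
theorem solution_spec : Claim_equal_solution := by
  intro s _
  unfold Spec_solution solution solution_alt
  apply PySem.List.foldl_congr_mem
  intro acc i hi
  rw [PySem.List.mem_pyRange_one] at hi
  have h2 : i * 2 ≤ (s.toList.length : Int) := by
    have := (PySem.Int.le_floordiv_iff_mul_le (a := (PySem.List.len s.toList))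
      (b := 2) (q := i) (by omega)).mp (by omega)
    rwa [PySem.List.len_eq] at this
  have hi1 : i = ((i.toNat : Nat) : Int) := by omega
  rw [hi1]
  have := pv_peri s.toList i.toNat (by omega) (by omega)
  simp only [PySem.List.len_eq] at this ⊢
  exact congrArg (min acc) this
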